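-- pv_equiv track=rewrite | github.com/ASSERT-KTH/Mokav | experiments/pynguin/c4b/single-return/generated_tests/src_2061/7/src_2061.py | func
-- ===== SOURCE A (Python) =====
-- def func(*args):
--
-- 	entrada = args[0].lower()
-- 	entrada = entrada.replace('a', '')
-- 	entrada = entrada.replace('e', '')
-- 	entrada = entrada.replace('i', '')
-- 	entrada = entrada.replace('o', '')
-- 	entrada = entrada.replace('u', '')
-- 	entrada = entrada.replace('y', '')
-- 	entrada.split()
-- 	i = 2
-- 	final = ''
-- 	for j in entrada:
-- 	    if (i == 2):
-- 	        final += '.'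
-- 	        i = 1
-- 	    final += j
-- 	    i += 1
-- 	return(final)
-- ===== SOURCE B (Python) =====
-- def func(*args):
--     return ''.join('.' + c for c in args[0].lower() if c not in 'aeiouy')
-- ===== Notes on version B (the rewrite author's own statement) =====
-- stated objective: simpler
-- what changed: Six successive full-string replace scans plus a stateful build loop are replaced by one combined filter-and-build pass over the lowercased string.
import Mathlib
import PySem

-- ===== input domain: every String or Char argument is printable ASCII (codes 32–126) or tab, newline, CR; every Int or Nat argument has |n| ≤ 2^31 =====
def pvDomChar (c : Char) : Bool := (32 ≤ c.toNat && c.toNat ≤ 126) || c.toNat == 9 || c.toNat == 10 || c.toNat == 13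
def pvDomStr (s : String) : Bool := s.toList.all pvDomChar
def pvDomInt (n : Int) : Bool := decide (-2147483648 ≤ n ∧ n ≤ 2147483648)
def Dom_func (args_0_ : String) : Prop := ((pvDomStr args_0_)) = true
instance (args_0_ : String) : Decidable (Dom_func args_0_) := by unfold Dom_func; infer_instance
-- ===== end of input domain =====

-- B merges A's six successive replace scans and its stateful build loop into one
-- filter-and-build pass; objective: simpler.

-- ===== PORT A =====
-- literal port: lower, six replaces, then the for-loop with state (i, final)
def func (args_0_ : String) : String :=
  let entrada := PySem.Str.lower args_0_
  let entrada := PySem.Str.replace entrada "a" ""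
  let entrada := PySem.Str.replace entrada "e" ""
  let entrada := PySem.Str.replace entrada "i" ""
  let entrada := PySem.Str.replace entrada "o" ""
  let entrada := PySem.Str.replace entrada "u" ""
  let entrada := PySem.Str.replace entrada "y" ""
  -- entrada.split() : result discarded in A
  let st := entrada.toList.foldl (fun (st : Int × List Char) j =>
      let st := if st.1 = 2 then ((1 : Int), st.2 ++ ['.']) else st
      (st.1 + 1, st.2 ++ [j])) ((2 : Int), [])
  String.mk st.2

-- ===== PORT B =====
-- literal port of Source B: one pass, keep non-vowels, emit '.'+c for each
-- ('c not in "aeiouy"' ported by hand as list membership on chars — exact)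
def func_alt (args_0_ : String) : String :=
  String.mk (((PySem.Str.lower args_0_).toList.filter
      (fun c => !(['a','e','i','o','u','y'].contains c))).flatMap
      (fun c => ['.', c]))

-- ===== PRECONDITION & SPEC =====
def Spec_func (args_0_ : String) (out : String) : Prop := out = func_alt args_0_
instance (args_0_ : String) (out : String) : Decidable (Spec_func args_0_ out) := by unfold Spec_func; infer_instance

-- ===== CLAIM (what is proved, stated in full; the proofs are below) =====
def Claim_equal_func : Prop := ∀ (args_0_ : String), Dom_func args_0_ → Spec_func args_0_ (func args_0_)

-- ===== LEMMAS AND PROOFS =====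

-- replace of a single char by '' is a filter
theorem replace_go_single (c : Char) (fuel : Nat) (l acc : List Char)
    (h : l.length ≤ fuel) :
    PySem.Chars.replace.go [c] [] fuel l acc
      = acc.reverse ++ l.filter (fun x => x != c) := by
  induction fuel generalizing l acc with
  | zero =>
    cases l with
    | nil => simp [PySem.Chars.replace.go]
    | cons a t => simp at h
  | succ n ih =>
    cases l with
    | nil => simp [PySem.Chars.replace.go]
    | cons a t =>
      simp only [List.length_cons, Nat.succ_le_succ_iff] at h
      by_cases hc : a = c
      · subst hc
        have hp : ([a] : List Char).isPrefixOf (a :: t) = true := by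
          simp [List.isPrefixOf]
        simp [PySem.Chars.replace.go, hp, ih t acc h, List.filter]
      · have hp : ([c] : List Char).isPrefixOf (a :: t) = false := by
          simp only [List.isPrefixOf, Bool.and_true]
          exact beq_eq_false_iff_ne.mpr (fun h' => hc h'.symm)
        simp [PySem.Chars.replace.go, hp, ih t (a :: acc) h, List.filter,
          bne, beq_eq_false_iff_ne.mpr (fun h' : a = c => hc h')]

theorem replace_single (c : Char) (l : List Char) :
    PySem.Chars.replace l [c] [] = l.filter (fun x => x != c) := by
  simp [PySem.Chars.replace, replace_go_single c l.length l [] le_rfl]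

-- the loop builds acc ++ flatMap ['.', c]; i is 2 at every iteration head
theorem loop_flatMap (l acc : List Char) :
    l.foldl (fun (st : Int × List Char) j =>
        let st := if st.1 = 2 then ((1 : Int), st.2 ++ ['.']) else st
        (st.1 + 1, st.2 ++ [j])) ((2 : Int), acc)
      = ((2 : Int), acc ++ l.flatMap (fun c => ['.', c])) := by
  induction l generalizing acc with
  | nil => simp
  | cons a t ih => simp [ih]

-- ===== VERDICT (by name: the statement is the Claim_ definition above) =====
theorem func_spec : Claim_equal_func := by
  intro s _
  unfold Spec_func func func_alt
  have ha : ("a":String).toList = ['a'] := rfl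
  have he : ("e":String).toList = ['e'] := rfl
  have hi : ("i":String).toList = ['i'] := rfl
  have ho : ("o":String).toList = ['o'] := rfl
  have hu : ("u":String).toList = ['u'] := rfl
  have hy : ("y":String).toList = ['y'] := rfl
  have hn : ("":String).toList = [] := rfl
  simp only [PySem.Str.toList_replace, ha, he, hi, ho, hu, hy, hn, replace_single]
  simp only [loop_flatMap, List.nil_append, List.filter_filter]
  congr 2
  apply List.filter_congr
  intro x _
  simp only [List.contains_cons, List.contains_nil, Bool.or_false, bne, Bool.not_or]
  cases h1 : x == 'a' <;> cases h2 : x == 'e' <;> cases h3 : x == 'i' <;>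
    cases h4 : x == 'o' <;> cases h5 : x == 'u' <;> cases h6 : x == 'y' <;>
    simp [h1, h2, h3, h4, h5, h6]
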